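-- pv_equiv track=rewrite | github.com/creerghost/42next_exam03 | test_myself/twist.py | twist
-- ===== SOURCE A (Python) =====
-- def twist(lst: list[int], n):
--     for _ in lst:
--         tmp = lst.pop()
--         lst.insert(0, tmp)
--         n -= 1
--         if n == 0:
--             break
--     return lst
-- ===== SOURCE B (Python) =====
-- def twist(lst: list[int], n):
--     # Rotate right in place via the three-reversal trick.
--     # Effective shift: n itself when 0 < n < len(lst), else 0
--     # (n <= 0, n >= len: A's loop runs the full length -> identity).
--     L = len(lst)
--     k = n if 0 < n < L else 0
--     lst.reverse()
--     lst[:k] = lst[:k][::-1]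
--     lst[k:] = lst[k:][::-1]
--     return lst
-- ===== Notes on version B (the rewrite author's own statement) =====
-- stated objective: alternative
-- what changed: Replaces A's pop-last/insert-front loop (one rotation step per iteration, with a break when the counter hits zero) by the three-reversal in-place rotation: compute the effective shift k (n when 0 < n < len, else 0), reverse the whole list, then reverse the first k and the remaining elements.
import Mathlib
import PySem

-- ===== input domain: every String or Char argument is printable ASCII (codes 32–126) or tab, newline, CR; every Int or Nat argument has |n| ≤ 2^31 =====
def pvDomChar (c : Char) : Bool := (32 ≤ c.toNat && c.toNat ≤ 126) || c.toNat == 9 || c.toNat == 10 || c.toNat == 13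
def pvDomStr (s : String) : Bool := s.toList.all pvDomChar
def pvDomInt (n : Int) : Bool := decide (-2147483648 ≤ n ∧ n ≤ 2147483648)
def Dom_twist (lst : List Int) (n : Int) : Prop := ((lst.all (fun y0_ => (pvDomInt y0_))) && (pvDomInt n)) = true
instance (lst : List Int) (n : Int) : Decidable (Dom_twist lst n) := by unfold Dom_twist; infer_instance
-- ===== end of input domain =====

-- B replaces A's pop/insert rotation loop by the in-place three-reversal rotation (objective: alternative
-- algorithm; same O(len) cost). Both Pythons mutate lst in place identically; the theorems are about the
-- returned value.

-- ===== PORT A =====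
-- Python's `for _ in lst` iterates by index while the body keeps lst's length constant
-- (one pop + one insert per step), so the loop body runs exactly lst.length times unless broken.
def twistLoopA : Nat → List Int → Int → List Int
  | 0, lst, _ => lst
  | m+1, lst, n =>
    match PySem.List.pop? lst with
    | none => lst          -- unreachable: with fuel = length, pop? only fails on [], where the loop does not run
    | some (tmp, rest) =>
      let lst2 := PySem.List.insert rest 0 tmp
      if n - 1 = 0 then lst2 else twistLoopA m lst2 (n - 1)

def twist (lst : List Int) (n : Int) : List Int :=
  twistLoopA lst.length lst n

-- ===== PORT B =====
def twist_alt (lst : List Int) (n : Int) : List Int :=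
  let L : Int := lst.length
  let k : Int := if 0 < n ∧ n < L then n else 0
  let r := lst.reverse                                      -- lst.reverse()
  let front := (PySem.List.slice r none (some k)).reverse   -- lst[:k] = lst[:k][::-1]
  let back := (PySem.List.slice r (some k) none).reverse    -- lst[k:] = lst[k:][::-1]
  front ++ back

-- ===== PRECONDITION & SPEC =====
def Spec_twist (lst : List Int) (n : Int) (out : List Int) : Prop := out = twist_alt lst n
instance (lst : List Int) (n : Int) (out : List Int) : Decidable (Spec_twist lst n out) := by unfold Spec_twist; infer_instance

-- ===== CLAIM (what is proved, stated in full; the proofs are below) =====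
def Claim_equal_twist : Prop := ∀ (lst : List Int) (n : Int), Dom_twist lst n → Spec_twist lst n (twist lst n)

-- ===== LEMMAS AND PROOFS =====

-- One step of A's loop body: pop the last element and reinsert it at position 0.
def rotR (l : List Int) : List Int :=
  match PySem.List.pop? l with
  | none => l
  | some (t, r) => PySem.List.insert r 0 t

lemma pop?_of_ne_nil (l : List Int) (h : l ≠ []) :
    PySem.List.pop? l = some (l.getLast h, l.dropLast) := by
  conv_lhs => rw [← List.dropLast_append_getLast h]
  exact PySem.List.pop?_last _ _

lemma rotR_of_ne_nil (l : List Int) (h : l ≠ []) :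
    rotR l = l.getLast h :: l.dropLast := by
  simp [rotR, pop?_of_ne_nil l h, PySem.List.insert_zero]

lemma rotR_ne_nil (l : List Int) (h : l ≠ []) : rotR l ≠ [] := by
  rw [rotR_of_ne_nil l h]; simp

-- rotating right j times = drop (L-j) ++ take (L-j)
lemma rotR_step (l : List Int) (m : Nat) (h1 : 1 ≤ m) (h2 : m ≤ l.length) :
    rotR (l.drop m ++ l.take m) = l.drop (m-1) ++ l.take (m-1) := by
  obtain ⟨m', rfl⟩ : ∃ m', m = m' + 1 := ⟨m - 1, by omega⟩
  have hm : m' < l.length := by omega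
  have htake : l.take (m'+1) = l.take m' ++ [l[m']] := by
    rw [List.take_add_one, List.getElem?_eq_getElem hm]; rfl
  have hx : l.drop (m'+1) ++ l.take (m'+1) = (l.drop (m'+1) ++ l.take m') ++ [l[m']] := by
    rw [htake, List.append_assoc]
  rw [hx]
  have hp : PySem.List.pop? ((l.drop (m'+1) ++ l.take m') ++ [l[m']]) =
      some (l[m'], l.drop (m'+1) ++ l.take m') := PySem.List.pop?_last _ _
  simp only [rotR, hp, PySem.List.insert_zero, Nat.add_sub_cancel]
  rw [List.drop_eq_getElem_cons hm, List.cons_append]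

lemma rotR_iterate (l : List Int) (j : Nat) (hj : j ≤ l.length) :
    rotR^[j] l = l.drop (l.length - j) ++ l.take (l.length - j) := by
  induction j with
  | zero => simp
  | succ j ih =>
    have hj' : j ≤ l.length := by omega
    rw [Function.iterate_succ_apply', ih hj']
    have h1 : 1 ≤ l.length - j := by omega
    have h2 : l.length - j ≤ l.length := by omega
    have := rotR_step l (l.length - j) h1 h2
    rw [this]
    have : l.length - j - 1 = l.length - (j+1) := by omega
    rw [this]

-- characterisation of A's loop
lemma twistLoopA_spec (m : Nat) : ∀ (l : List Int) (n : Int), l ≠ [] →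
    twistLoopA m l n = if 1 ≤ n ∧ n ≤ (m : Int) then rotR^[n.toNat] l else rotR^[m] l := by
  induction m with
  | zero =>
    intro l n _
    have : ¬ (1 ≤ n ∧ n ≤ (0 : Int)) := by omega
    simp [twistLoopA, this]
  | succ m ih =>
    intro l n hl
    have hpop := pop?_of_ne_nil l hl
    have hrot : PySem.List.insert l.dropLast 0 (l.getLast hl) = rotR l := by
      rw [rotR_of_ne_nil l hl, PySem.List.insert_zero]
    by_cases hn : n - 1 = 0
    · have hn1 : n = 1 := by omega
      subst hn1
      simp only [twistLoopA, hpop, hrot]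
      have hc : (1:Int) ≤ 1 ∧ (1:Int) ≤ ((m+1 : Nat) : Int) := by omega
      rw [if_pos hc]
      simp
    · have step : twistLoopA (m+1) l n = twistLoopA m (rotR l) (n - 1) := by
        simp only [twistLoopA, hpop, hrot]
        rw [if_neg hn]
      rw [step, ih (rotR l) (n-1) (rotR_ne_nil l hl)]
      by_cases hc : 1 ≤ n - 1 ∧ n - 1 ≤ (m : Int)
      · have hc' : 1 ≤ n ∧ n ≤ ((m+1 : Nat) : Int) := by omega
        rw [if_pos hc, if_pos hc']
        have ht : n.toNat = (n-1).toNat + 1 := by omega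
        rw [ht, Function.iterate_succ_apply]
      · have hc' : ¬ (1 ≤ n ∧ n ≤ ((m+1 : Nat) : Int)) := by
          push_cast at hc ⊢; omega
        rw [if_neg hc, if_neg hc', Function.iterate_succ_apply]

lemma rotR_iterate_full (l : List Int) : rotR^[l.length] l = l := by
  rw [rotR_iterate l l.length (le_refl _)]; simp

-- B computes drop (L-k) ++ take (L-k) for its effective shift k
lemma twist_alt_eq (lst : List Int) (n : Int) :
    twist_alt lst n =
      if 0 < n ∧ n < (lst.length : Int) then
        lst.drop (lst.length - n.toNat) ++ lst.take (lst.length - n.toNat)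
      else lst := by
  by_cases hc : 0 < n ∧ n < (lst.length : Int)
  · rw [if_pos hc]
    have hn0 : 0 ≤ n := by omega
    simp only [twist_alt, if_pos hc]
    rw [PySem.List.slice_to _ hn0, PySem.List.slice_from _ hn0]
    rw [List.take_reverse, List.drop_reverse]
    simp
  · rw [if_neg hc]
    simp only [twist_alt, if_neg hc]
    rw [PySem.List.slice_to _ (by omega : (0:Int) ≤ 0), PySem.List.slice_from _ (by omega : (0:Int) ≤ 0)]
    simp

-- ===== VERDICT (by name: the statement is the Claim_ definition above) =====
theorem twist_spec : Claim_equal_twist := by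
  intro lst n _
  unfold Spec_twist
  rcases eq_or_ne lst [] with rfl | hl
  · simp [twist, twistLoopA, twist_alt_eq]
  · rw [twist_alt_eq]
    unfold twist
    rw [twistLoopA_spec lst.length lst n hl]
    by_cases hc : 0 < n ∧ n < (lst.length : Int)
    · rw [if_pos hc]
      have hcc : 1 ≤ n ∧ n ≤ (lst.length : Int) := by omega
      rw [if_pos hcc, rotR_iterate lst n.toNat (by omega)]
    · rw [if_neg hc]
      by_cases hcc : 1 ≤ n ∧ n ≤ (lst.length : Int)
      · -- here n = lst.length: a full rotation, identity
        have hn : n = (lst.length : Int) := by omega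
        rw [if_pos hcc, hn]
        have : ((lst.length : Int)).toNat = lst.length := by omega
        rw [this, rotR_iterate_full]
      · rw [if_neg hcc, rotR_iterate_full]
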